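-- pv_equiv track=rewrite | github.com/VanshNigam/GFG_podt | Difficulty: Medium/Count Frequency of an Element in a Given Range/count-frequency-of-an-element-in-a-given-range.py | freqInRange
-- ===== SOURCE A (Python) =====
-- from collections import defaultdict
-- import bisect
--
-- def freqInRange(arr, queries):
--     # Preprocess: Map value to list of indices
--     positions = defaultdict(list)
--     for idx, val in enumerate(arr):
--         positions[val].append(idx)
--
--     result = []
--     for l, r, x in queries:
--         idx_list = positions.get(x, [])
--         # Find how many indices are in range [l, r]
--         left = bisect.bisect_left(idx_list, l)
--         right = bisect.bisect_right(idx_list, r)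
--         result.append(right - left)
--
--     return result
-- ===== SOURCE B (Python) =====
-- def freqInRange(arr, queries):
--     # Prefix-count formulation: occurrences of x at index <= r minus occurrences at index < l,
--     # computed by one direct scan per query (no index table, no bisect).
--     result = []
--     for l, r, x in queries:
--         cr = 0  # occurrences of x at index <= r
--         cl = 0  # occurrences of x at index < l
--         for i, v in enumerate(arr):
--             if v == x:
--                 if i <= r:
--                     cr += 1
--                 if i < l:
--                     cl += 1
--         result.append(cr - cl)
--     return result
-- ===== Notes on version B (the rewrite author's own statement) =====
-- stated objective: simpler
-- what changed: Dropped the defaultdict index table and bisect binary searches; each query is answered by one direct scan of the array keeping two counters (occurrences of x at index <= r and at index < l), whose difference reproduces A's bisect_right - bisect_left exactly, including negative results on inverted ranges.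
import Mathlib
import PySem

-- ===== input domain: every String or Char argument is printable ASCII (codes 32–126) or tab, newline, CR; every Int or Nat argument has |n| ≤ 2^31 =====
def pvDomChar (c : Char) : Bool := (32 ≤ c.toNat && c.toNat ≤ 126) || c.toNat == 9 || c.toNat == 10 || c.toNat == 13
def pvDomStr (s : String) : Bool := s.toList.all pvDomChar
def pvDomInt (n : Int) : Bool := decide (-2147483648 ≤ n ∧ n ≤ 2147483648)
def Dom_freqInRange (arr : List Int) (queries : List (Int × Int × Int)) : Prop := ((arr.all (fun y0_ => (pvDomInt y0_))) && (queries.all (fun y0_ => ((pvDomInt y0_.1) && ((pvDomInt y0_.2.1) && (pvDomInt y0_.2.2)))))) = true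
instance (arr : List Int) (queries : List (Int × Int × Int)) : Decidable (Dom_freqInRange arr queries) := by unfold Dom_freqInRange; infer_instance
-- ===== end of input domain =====

-- B answers each query by a direct two-counter scan (count at index <= r minus count at index < l)
-- instead of A's per-value index table with binary searches; equivalent on all inputs, no speed claim.

-- ===== PORT A =====
def freqInRange (arr : List Int) (queries : List (Int × Int × Int)) : List Int :=
  -- positions = defaultdict(list); for idx, val in enumerate(arr): positions[val].append(idx)
  let positions : PySem.Dict Int (List Int) :=
    (PySem.List.enumerate arr).foldl (fun d p => d.modify p.2 [] (fun L => L ++ [p.1])) PySem.Dict.empty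
  -- for l, r, x in queries: result.append(bisect_right(...) - bisect_left(...))
  queries.foldl (fun result q =>
    let idxList := positions.getD q.2.2 []
    let left := PySem.List.bisectLeft idxList q.1
    let right := PySem.List.bisectRight idxList q.2.1
    result ++ [(right : Int) - (left : Int)]) []

-- ===== PORT B =====
def freqInRange_alt (arr : List Int) (queries : List (Int × Int × Int)) : List Int :=
  -- per query, one scan with two counters: cr = #occurrences of x at index <= r, cl = #occurrences at index < l
  queries.foldl (fun result q =>
    let c := (PySem.List.enumerate arr).foldl
      (fun (s : Int × Int) p =>
        if p.2 = q.2.2 then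
          ((if p.1 ≤ q.2.1 then s.1 + 1 else s.1), (if p.1 < q.1 then s.2 + 1 else s.2))
        else s) (0, 0)
    result ++ [c.1 - c.2]) []

-- ===== PRECONDITION & SPEC =====
def Spec_freqInRange (arr : List Int) (queries : List (Int × Int × Int)) (out : List Int) : Prop := out = freqInRange_alt arr queries
instance (arr : List Int) (queries : List (Int × Int × Int)) (out : List Int) : Decidable (Spec_freqInRange arr queries out) := by unfold Spec_freqInRange; infer_instance

-- ===== CLAIM (what is proved, stated in full; the proofs are below) =====
def Claim_equal_freqInRange : Prop := ∀ (arr : List Int) (queries : List (Int × Int × Int)), Dom_freqInRange arr queries → Spec_freqInRange arr queries (freqInRange arr queries)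

-- ===== LEMMAS AND PROOFS =====

theorem countP_split (p : Int → Bool) (xs : List Int) (k : Nat) (hk : k ≤ xs.length)
    (h1 : ∀ (j : Nat) (hj : j < xs.length), j < k → p xs[j])
    (h2 : ∀ (j : Nat) (hj : j < xs.length), k ≤ j → ¬ p xs[j]) :
    xs.countP p = k := by
  have hsplit : xs = xs.take k ++ xs.drop k := (List.take_append_drop k xs).symm
  rw [hsplit, List.countP_append]
  have ht : (xs.take k).countP p = (xs.take k).length := by
    rw [List.countP_eq_length]
    intro a ha
    obtain ⟨j, hj, rfl⟩ := List.mem_iff_getElem.mp ha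
    rw [List.getElem_take]
    exact h1 j (by simp at hj; omega) (by simp at hj; omega)
  have hd : (xs.drop k).countP p = 0 := by
    rw [List.countP_eq_zero]
    intro a ha
    obtain ⟨j, hj, rfl⟩ := List.mem_iff_getElem.mp ha
    rw [List.getElem_drop]
    exact h2 (k + j) (by simp at hj; omega) (by omega)
  rw [ht, hd, List.length_take]
  omega

theorem bisectLeft_eq_countP (xs : List Int) (v : Int) (h : xs.Pairwise (· ≤ ·)) :
    PySem.List.bisectLeft xs v = xs.countP (fun a => decide (a < v)) := by
  obtain ⟨hk, h1, h2⟩ := PySem.List.bisectLeft_spec xs v h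
  exact (countP_split _ xs _ hk (fun j hj hjk => by simp [h1 j hj hjk])
    (fun j hj hjk => by simp only [decide_eq_true_eq, not_lt]; exact h2 j hj hjk)).symm

theorem bisectRight_eq_countP (xs : List Int) (v : Int) (h : xs.Pairwise (· ≤ ·)) :
    PySem.List.bisectRight xs v = xs.countP (fun a => decide (a ≤ v)) := by
  obtain ⟨hk, h1, h2⟩ := PySem.List.bisectRight_spec xs v h
  exact (countP_split _ xs _ hk (fun j hj hjk => by simp [h1 j hj hjk])
    (fun j hj hjk => by simp only [decide_eq_true_eq, not_le]; exact h2 j hj hjk)).symm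


theorem pos_getD (arr : List Int) (x : Int) :
    ((PySem.List.enumerate arr).foldl (fun d p => d.modify p.2 [] (fun L => L ++ [p.1])) PySem.Dict.empty).getD x []
      = ((PySem.List.enumerate arr).filter (fun p => p.2 == x)).map (·.1) := by
  have h := PySem.Dict.getD_foldl_modify_append ((PySem.List.enumerate arr).map Prod.swap)
    (PySem.Dict.empty (κ := Int) (ν := List Int)) x
  rw [List.foldl_map] at h
  simp only [Prod.fst_swap, Prod.snd_swap, List.filter_map, List.map_map] at h
  simpa [Function.comp, PySem.Dict.getD_empty] using h

theorem pos_sorted (arr : List Int) (x : Int) :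
    (((PySem.List.enumerate arr).filter (fun p => p.2 == x)).map (·.1)).Pairwise (· ≤ ·) := by
  rw [List.pairwise_map]
  exact ((PySem.List.pairwise_lt_enumerate arr 0).filter _).imp (fun h => le_of_lt h)

theorem query_eq (arr : List Int) (l r x : Int) :
    ((PySem.List.bisectRight (((PySem.List.enumerate arr).filter (fun p => p.2 == x)).map (·.1)) r : Int)
      - (PySem.List.bisectLeft (((PySem.List.enumerate arr).filter (fun p => p.2 == x)).map (·.1)) l : Int))
    = ((PySem.List.enumerate arr).foldl
        (fun (s : Int × Int) p =>
          if p.2 = x then ((if p.1 ≤ r then s.1 + 1 else s.1), (if p.1 < l then s.2 + 1 else s.2)) else s)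
        (0, 0)).1
      - ((PySem.List.enumerate arr).foldl
        (fun (s : Int × Int) p =>
          if p.2 = x then ((if p.1 ≤ r then s.1 + 1 else s.1), (if p.1 < l then s.2 + 1 else s.2)) else s)
        (0, 0)).2 := by
  rw [bisectRight_eq_countP _ _ (pos_sorted arr x), bisectLeft_eq_countP _ _ (pos_sorted arr x)]
  rw [PySem.List.foldl_congr_mem _ _
      (fun (s : Int × Int) (p : Int × Int) =>
        ((fun (c : Int) (p : Int × Int) => if p.2 = x ∧ p.1 ≤ r then c + 1 else c) s.1 p,
         (fun (c : Int) (p : Int × Int) => if p.2 = x ∧ p.1 < l then c + 1 else c) s.2 p))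
      _ (by intro acc p _; dsimp only; split_ifs <;> simp_all)]
  rw [PySem.List.foldl_prod_mk (f := fun (c : Int) (p : Int × Int) => if p.2 = x ∧ p.1 ≤ r then c + 1 else c) (g := fun (c : Int) (p : Int × Int) => if p.2 = x ∧ p.1 < l then c + 1 else c)]
  rw [PySem.List.foldl_ite_add_one (fun p : Int × Int => p.2 = x ∧ p.1 ≤ r),
      PySem.List.foldl_ite_add_one (fun p : Int × Int => p.2 = x ∧ p.1 < l)]
  simp only [List.countP_map, List.countP_filter, zero_add]
  congr 2 <;> exact List.countP_congr (fun p _ => by simp [Function.comp]; tauto)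

-- ===== VERDICT (by name: the statement is the Claim_ definition above) =====
theorem freqInRange_spec : Claim_equal_freqInRange := by
  intro arr queries _
  unfold Spec_freqInRange
  simp only [freqInRange, freqInRange_alt]
  rw [PySem.List.foldl_append_singleton_eq_map, PySem.List.foldl_append_singleton_eq_map,
      List.nil_append, List.nil_append]
  refine List.map_congr_left (fun q _ => ?_)
  rw [pos_getD]
  exact query_eq arr q.1 q.2.1 q.2.2
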